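-- pv_equiv track=rewrite | github.com/martroben/python_math | linear_eq_solver.py | get_determinant_signs
-- ===== SOURCE A (Python) =====
-- def scalar_x_vector(scalar, vector):
--     return [scalar * vector[i] for i in range(len(vector))]
--
-- def get_determinant_signs(n):
--
--     signs_vec = [1]
--     for s in range(1, n):
--         seed = [(-1) ** i for i in range(s+1)]
--
--         new_iteration = []
--         for t in seed:
--             new_iteration += scalar_x_vector(t, signs_vec)
--
--         signs_vec = new_iteration
--
--     return signs_vec
-- ===== SOURCE B (Python) =====
-- def get_determinant_signs(n):
--     # Closed-form: element k is (-1)**(sum of k's factorial-number-system digits),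
--     # decoded least-significant-first with radices 2, 3, ..., n.
--     m = 1
--     for s in range(2, n + 1):
--         m *= s
--     out = []
--     for k in range(m):
--         parity = 0
--         for s in range(2, n + 1):
--             parity += k % s
--             k //= s
--         out.append(1 if parity % 2 == 0 else -1)
--     return out
-- ===== Notes on version B (the rewrite author's own statement) =====
-- stated objective: alternative
-- what changed: A builds the n!-vector by n-1 rounds of concatenating sign-scaled copies of the previous vector; B computes each of the n! entries independently in closed form as the parity sign of the index's factorial-number-system digits (radices 2..n).
import Mathlib
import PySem

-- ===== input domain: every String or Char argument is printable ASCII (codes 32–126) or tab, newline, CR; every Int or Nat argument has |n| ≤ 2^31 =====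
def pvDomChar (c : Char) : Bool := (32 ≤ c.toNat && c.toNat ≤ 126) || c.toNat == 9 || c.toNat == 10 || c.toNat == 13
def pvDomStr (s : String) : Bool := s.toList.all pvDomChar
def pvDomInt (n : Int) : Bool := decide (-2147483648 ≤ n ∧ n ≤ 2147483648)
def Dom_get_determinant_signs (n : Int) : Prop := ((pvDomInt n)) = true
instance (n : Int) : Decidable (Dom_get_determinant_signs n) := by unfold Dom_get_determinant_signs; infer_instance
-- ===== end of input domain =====

-- B replaces A's n-1 rounds of list concatenation (scaled copies of the previous vector) by a
-- closed-form per-index rule: element k of the n!-vector is the parity sign of k's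
-- factorial-number-system digits (radices 2..n, least significant first). Objective: alternative.

-- ===== PORT A =====
def scalar_x_vector (scalar : Int) (vector : List Int) : List Int :=
  (PySem.List.pyRange 0 (vector.length : Int) 1).map
    (fun i => scalar * PySem.List.pyGetD vector i 0)

def get_determinant_signs (n : Int) : List Int :=
  (PySem.List.pyRange 1 n 1).foldl
    (fun signs_vec s =>
      let seed := (PySem.List.pyRange 0 (s + 1) 1).map (fun i => (-1 : Int) ^ i.toNat)
      seed.foldl (fun acc t => acc ++ scalar_x_vector t signs_vec) [])
    [1]

-- ===== PORT B =====
def get_determinant_signs_alt (n : Int) : List Int :=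
  let m := (PySem.List.pyRange 2 (n + 1) 1).foldl (fun acc s => acc * s) 1
  (PySem.List.pyRange 0 m 1).map (fun k =>
    let st := (PySem.List.pyRange 2 (n + 1) 1).foldl
      (fun (st : Int × Int) s => (st.1 + PySem.Int.mod st.2 s, PySem.Int.floordiv st.2 s)) (0, k)
    if PySem.Int.mod st.1 2 = 0 then (1 : Int) else -1)

-- ===== PRECONDITION & SPEC =====
def Spec_get_determinant_signs (n : Int) (out : List Int) : Prop := out = get_determinant_signs_alt n
instance (n : Int) (out : List Int) : Decidable (Spec_get_determinant_signs n out) := by unfold Spec_get_determinant_signs; infer_instance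

-- ===== CLAIM (what is proved, stated in full; the proofs are below) =====
def Claim_equal_get_determinant_signs : Prop := ∀ (n : Int), Dom_get_determinant_signs n → Spec_get_determinant_signs n (get_determinant_signs n)

-- ===== LEMMAS AND PROOFS =====

-- pvF j = (j+1)!, the vector length after j rounds
def pvF : Nat → Nat
  | 0 => 1
  | j + 1 => pvF j * (j + 2)

-- the reference vector: A's recurrence written over Nat
def pvG : Nat → List Int
  | 0 => [1]
  | j + 1 => (List.range (j + 2)).flatMap (fun i => (pvG j).map (fun x => (-1 : Int) ^ i * x))

-- B's digit decoder over Nat: (digit-sum accumulator, remaining value) after radices 2..j+1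
def pvP : Nat → Nat → Nat × Nat
  | 0, k => (0, k)
  | j + 1, k => ((pvP j k).1 + (pvP j k).2 % (j + 2), (pvP j k).2 / (j + 2))

lemma pvF_pos (j : Nat) : 0 < pvF j := by
  induction j with
  | zero => simp [pvF]
  | succ j ih => simp [pvF]; positivity

lemma pvP_decompose (j : Nat) : ∀ q r, r < pvF j →
    pvP j (q * pvF j + r) = ((pvP j r).1, q) := by
  induction j with
  | zero =>
    intro q r hr
    simp [pvF] at hr
    subst hr
    simp [pvP, pvF]
  | succ j ih =>
    intro q r hr
    have hF := pvF_pos j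
    set q' := r / pvF j with hq'
    set r' := r % pvF j with hr'
    have hrlt : r' < pvF j := Nat.mod_lt _ hF
    have hqlt : q' < j + 2 := by
      rw [hq']
      exact Nat.div_lt_of_lt_mul (by simpa [pvF] using hr)
    have hdm := Nat.div_add_mod r (pvF j)
    have hdecomp : r = q' * pvF j + r' := by rw [hq', hr', Nat.mul_comm]; omega
    have hk : q * pvF (j + 1) + r = (q * (j + 2) + q') * pvF j + r' := by
      rw [hdecomp]; simp [pvF]; ring
    rw [show pvP (j+1) (q * pvF (j+1) + r) =
        ((pvP j (q * pvF (j+1) + r)).1 + (pvP j (q * pvF (j+1) + r)).2 % (j + 2),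
         (pvP j (q * pvF (j+1) + r)).2 / (j + 2)) from rfl,
        hk, ih _ _ hrlt]
    rw [show pvP (j+1) r = ((pvP j r).1 + (pvP j r).2 % (j + 2), (pvP j r).2 / (j + 2)) from rfl,
        hdecomp, ih _ _ hrlt]
    simp
    rw [Nat.add_comm, Nat.add_mul_div_right _ _ (by omega : 0 < j + 2), Nat.div_eq_of_lt hqlt]
    omega

lemma range_mul_flatMap (b a : Nat) :
    List.range (b * a) = (List.range b).flatMap (fun q => (List.range a).map (fun r => q * a + r)) := by
  induction b with
  | zero => simp
  | succ b ih =>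
    rw [Nat.succ_mul, List.range_add, List.range_succ, ih]
    simp [List.flatMap_append]

lemma pv_sgn_add (p q : Nat) :
    (if (p + q) % 2 = 0 then (1 : Int) else -1)
      = (-1 : Int) ^ q * (if p % 2 = 0 then (1 : Int) else -1) := by
  rcases Nat.even_or_odd q with hq | hq
  · rw [Even.neg_one_pow hq, one_mul]
    obtain ⟨c, hc⟩ := hq
    have h2 : (p + q) % 2 = p % 2 := by omega
    rw [h2]
  · rw [Odd.neg_one_pow hq]
    obtain ⟨c, hc⟩ := hq
    by_cases hp : p % 2 = 0
    · have h2 : (p + q) % 2 = 1 := by omega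
      simp [h2, hp]
    · have h2 : (p + q) % 2 = 0 := by omega
      simp [h2, hp]

lemma pvG_eq_map (j : Nat) :
    pvG j = (List.range (pvF j)).map
      (fun k => if (pvP j k).1 % 2 = 0 then (1 : Int) else -1) := by
  induction j with
  | zero => simp [pvG, pvF, pvP, List.range_succ]
  | succ j ih =>
    have hstep : pvF (j + 1) = (j + 2) * pvF j := by simp [pvF]; ring
    rw [show pvG (j+1) = (List.range (j + 2)).flatMap
          (fun i => (pvG j).map (fun x => (-1 : Int) ^ i * x)) from rfl,
        hstep, range_mul_flatMap, List.map_flatMap]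
    apply List.flatMap_congr
    intro q hq
    rw [List.mem_range] at hq
    rw [List.map_map, ih, List.map_map]
    apply List.map_congr_left
    intro r hr
    rw [List.mem_range] at hr
    have hd : pvP (j + 1) (q * pvF j + r)
        = ((pvP j r).1 + q % (j + 2), q / (j + 2)) := by
      rw [show pvP (j+1) (q * pvF j + r)
          = ((pvP j (q * pvF j + r)).1 + (pvP j (q * pvF j + r)).2 % (j + 2),
             (pvP j (q * pvF j + r)).2 / (j + 2)) from rfl,
          pvP_decompose j q r hr]
    simp only [Function.comp_apply, hd, Nat.mod_eq_of_lt hq]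
    exact (pv_sgn_add (pvP j r).1 q).symm

lemma scalar_x_vector_eq (t : Int) (v : List Int) :
    scalar_x_vector t v = v.map (fun x => t * x) := by
  unfold scalar_x_vector
  have h : (fun i => t * PySem.List.pyGetD v i 0)
      = (fun x => t * x) ∘ (fun i => PySem.List.pyGetD v i 0) := rfl
  rw [h, ← List.map_map, PySem.List.map_pyGetD_pyRange_zero']

lemma portA_step (sv : List Int) (ℓ : Nat) :
    ((PySem.List.pyRange 0 ((ℓ : Int) + 1 + 1) 1).map (fun i => (-1 : Int) ^ i.toNat)).foldl
        (fun acc t => acc ++ scalar_x_vector t sv) []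
      = (List.range (ℓ + 2)).flatMap (fun i => sv.map (fun x => (-1 : Int) ^ i * x)) := by
  rw [PySem.List.foldl_append_eq_flatMap, List.nil_append,
      show ((ℓ : Int) + 1 + 1) = ((ℓ + 2 : Nat) : Int) by push_cast; ring,
      PySem.List.pyRange_zero_natCast]
  rw [List.flatMap_map, List.flatMap_map]
  apply List.flatMap_congr
  intro i _
  simp [scalar_x_vector_eq]

lemma portA_eq (ℓ : Nat) : ∀ n : Int, (n - 1).toNat = ℓ → get_determinant_signs n = pvG ℓ := by
  induction ℓ with
  | zero =>
    intro n hn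
    have : n ≤ 1 := by omega
    unfold get_determinant_signs
    rw [PySem.List.pyRange_one_eq_nil this]
    rfl
  | succ ℓ ih =>
    intro n hn
    have h2 : (2 : Int) ≤ n := by omega
    have hrange : PySem.List.pyRange 1 n 1 = PySem.List.pyRange 1 (n - 1) 1 ++ [n - 1] := by
      have := PySem.List.pyRange_one_succ_right (a := 1) (b := n - 1) (by omega)
      simpa using this
    unfold get_determinant_signs
    rw [hrange, List.foldl_append, List.foldl_cons, List.foldl_nil]
    have hprev : (PySem.List.pyRange 1 (n - 1) 1).foldl
        (fun signs_vec s =>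
          ((PySem.List.pyRange 0 (s + 1) 1).map (fun i => (-1 : Int) ^ i.toNat)).foldl
            (fun acc t => acc ++ scalar_x_vector t signs_vec) []) [1] = pvG ℓ := by
      have := ih (n - 1) (by omega)
      unfold get_determinant_signs at this
      exact this
    rw [hprev]
    rw [show n - 1 = ((ℓ : Int) + 1) by omega]
    rw [portA_step (pvG ℓ) ℓ]
    rfl

lemma portB_range (n : Int) (h2 : (2:Int) ≤ n) :
    PySem.List.pyRange 2 (n + 1) 1 = PySem.List.pyRange 2 n 1 ++ [n] := by
  have := PySem.List.pyRange_one_succ_right (a := 2) (b := n) (by omega)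
  simpa using this

lemma portB_mfold (ℓ : Nat) : ∀ n : Int, (n - 1).toNat = ℓ →
    (PySem.List.pyRange 2 (n + 1) 1).foldl (fun acc s => acc * s) 1 = (pvF ℓ : Int) := by
  induction ℓ with
  | zero =>
    intro n hn
    rw [PySem.List.pyRange_one_eq_nil (by omega : n + 1 ≤ 2)]
    rfl
  | succ ℓ ih =>
    intro n hn
    have h2 : (2 : Int) ≤ n := by omega
    rw [portB_range n h2, List.foldl_append, List.foldl_cons, List.foldl_nil]
    have hprev := ih (n - 1) (by omega)
    rw [show n - 1 + 1 = n by ring] at hprev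
    rw [hprev, show n = ((ℓ : Int) + 2) by omega]
    show (pvF ℓ : Int) * ((ℓ : Int) + 2) = (pvF (ℓ + 1) : Int)
    simp [pvF]

lemma portB_pfold (ℓ : Nat) : ∀ n : Int, (n - 1).toNat = ℓ → ∀ k : Nat,
    (PySem.List.pyRange 2 (n + 1) 1).foldl
        (fun (st : Int × Int) s => (st.1 + PySem.Int.mod st.2 s, PySem.Int.floordiv st.2 s))
        ((0 : Int), (k : Int))
      = (((pvP ℓ k).1 : Int), ((pvP ℓ k).2 : Int)) := by
  induction ℓ with
  | zero =>
    intro n hn k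
    rw [PySem.List.pyRange_one_eq_nil (by omega : n + 1 ≤ 2)]
    rfl
  | succ ℓ ih =>
    intro n hn k
    have h2 : (2 : Int) ≤ n := by omega
    rw [portB_range n h2, List.foldl_append, List.foldl_cons, List.foldl_nil]
    have hprev := ih (n - 1) (by omega) k
    rw [show n - 1 + 1 = n by ring] at hprev
    rw [hprev, show n = (((ℓ + 2 : Nat) : Int)) by push_cast; omega]
    simp only [PySem.Int.mod_natCast, PySem.Int.floordiv_natCast]
    show ((((pvP ℓ k).1 : Int) + ((pvP ℓ k).2 % (ℓ + 2) : Nat)), (((pvP ℓ k).2 / (ℓ + 2) : Nat) : Int))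
        = (((pvP (ℓ + 1) k).1 : Int), ((pvP (ℓ + 1) k).2 : Int))
    rw [show pvP (ℓ+1) k = ((pvP ℓ k).1 + (pvP ℓ k).2 % (ℓ + 2), (pvP ℓ k).2 / (ℓ + 2)) from rfl]
    push_cast
    rfl

lemma portB_eq (ℓ : Nat) : ∀ n : Int, (n - 1).toNat = ℓ →
    get_determinant_signs_alt n = (List.range (pvF ℓ)).map
      (fun k => if (pvP ℓ k).1 % 2 = 0 then (1 : Int) else -1) := by
  intro n hn
  have hB : get_determinant_signs_alt n =
      (PySem.List.pyRange 0 ((PySem.List.pyRange 2 (n + 1) 1).foldl (fun acc s => acc * s) 1) 1).map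
        (fun k =>
          if PySem.Int.mod ((PySem.List.pyRange 2 (n + 1) 1).foldl
              (fun (st : Int × Int) s => (st.1 + PySem.Int.mod st.2 s, PySem.Int.floordiv st.2 s))
              (0, k)).1 2 = 0 then (1 : Int) else -1) := rfl
  rw [hB, portB_mfold ℓ n hn, PySem.List.pyRange_zero_natCast, List.map_map]
  apply List.map_congr_left
  intro k _
  simp only [Function.comp_apply]
  rw [portB_pfold ℓ n hn k]
  rw [show PySem.Int.mod (((pvP ℓ k).1 : Nat) : Int) 2 = (((pvP ℓ k).1 % 2 : Nat) : Int) from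
    by exact_mod_cast PySem.Int.mod_natCast (pvP ℓ k).1 2]
  norm_cast

-- ===== VERDICT (by name: the statement is the Claim_ definition above) =====
theorem get_determinant_signs_spec : Claim_equal_get_determinant_signs := by
  intro n _
  unfold Spec_get_determinant_signs
  rw [portA_eq ((n - 1).toNat) n rfl, portB_eq ((n - 1).toNat) n rfl, pvG_eq_map]
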